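-- pv_equiv track=rewrite | github.com/vanicat/advant-soluce-python | soluce11.py | missings
-- ===== SOURCE A (Python) =====
-- def missings(data):
--     rows:set[int] = {i for i, _ in data}
--     columns:set[int] = {j for _, j in data}
--
--     missing_row = {
--         a for a in range(min(rows), max(rows)) if a not in rows
--     }
--     missing_column = {
--         b for b in range(min(columns), max(columns)) if b not in columns
--     }
--     return missing_row, missing_column
-- ===== SOURCE B (Python) =====
-- def missings(data):
--     def gaps(vals):
--         s = sorted(set(vals))
--         out = set()
--         for prev, cur in zip(s, s[1:]):
--             out.update(range(prev + 1, cur))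
--         return out
--     return gaps([i for i, _ in data]), gaps([j for _, j in data])
-- ===== Notes on version B (the rewrite author's own statement) =====
-- stated objective: alternative
-- what changed: Instead of scanning the whole min..max range and testing set membership for every value, B sorts the distinct coordinates once and emits only the gaps between consecutive neighbours.
import Mathlib
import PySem

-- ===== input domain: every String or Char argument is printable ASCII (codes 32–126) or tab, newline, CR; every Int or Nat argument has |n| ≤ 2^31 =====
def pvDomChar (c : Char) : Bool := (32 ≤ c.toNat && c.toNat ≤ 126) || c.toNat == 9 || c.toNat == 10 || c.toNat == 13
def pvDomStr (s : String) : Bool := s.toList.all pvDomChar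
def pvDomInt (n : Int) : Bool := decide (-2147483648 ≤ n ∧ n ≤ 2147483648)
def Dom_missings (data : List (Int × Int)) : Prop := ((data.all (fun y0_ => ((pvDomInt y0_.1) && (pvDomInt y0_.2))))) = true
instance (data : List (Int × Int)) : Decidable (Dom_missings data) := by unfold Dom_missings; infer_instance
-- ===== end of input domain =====

-- B replaces A's scan of the whole min..max range with membership tests by a sort of the
-- distinct coordinates followed by emitting the gaps between consecutive neighbours
-- (alternative algorithm; equivalence proved on nonempty data, where A does not raise).

-- ===== PORT A =====
def missings (data : List (Int × Int)) : List Int × List Int :=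
  let rows : PySem.Set Int := PySem.Set.ofList (data.map (fun p => p.1))
  let columns : PySem.Set Int := PySem.Set.ofList (data.map (fun p => p.2))
  let missing_row : List Int :=
    match PySem.List.min? rows (fun x => x), PySem.List.max? rows (fun x => x) with
    | some mn, some mx =>
        PySem.Set.ofList ((PySem.List.pyRange mn mx 1).filter
          (fun a => !(PySem.Set.contains rows a)))
    | _, _ => []   -- unreachable under Pre_: min()/max() raise only on empty data
  let missing_column : List Int :=
    match PySem.List.min? columns (fun x => x), PySem.List.max? columns (fun x => x) with
    | some mn, some mx =>
        PySem.Set.ofList ((PySem.List.pyRange mn mx 1).filter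
          (fun b => !(PySem.Set.contains columns b)))
    | _, _ => []
  (missing_row, missing_column)

-- ===== PORT B =====
def gapsB (vals : List Int) : List Int :=
  let s := PySem.List.sorted (PySem.Set.ofList vals) (fun x => x) false
  (s.zip (PySem.List.slice s (some 1) none)).foldl
    (fun out p => PySem.Set.update out (PySem.List.pyRange (p.1 + 1) p.2 1))
    PySem.Set.empty

def missings_alt (data : List (Int × Int)) : List Int × List Int :=
  (gapsB (data.map (fun p => p.1)), gapsB (data.map (fun p => p.2)))

-- ===== PRECONDITION & SPEC =====
-- Pre_ excludes only the empty list, on which Python A raises ValueError (min() of an empty set).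
def Pre_missings (data : List (Int × Int)) : Prop := data ≠ []
instance (data : List (Int × Int)) : Decidable (Pre_missings data) := by unfold Pre_missings; infer_instance
def pvWitness_missings : (List (Int × Int)) := [(0, 3), (2, 1)]

def Spec_missings (data : List (Int × Int)) (out : List Int × List Int) : Prop := out = missings_alt data
instance (data : List (Int × Int)) (out : List Int × List Int) : Decidable (Spec_missings data out) := by unfold Spec_missings; infer_instance

-- ===== CLAIM (what is proved, stated in full; the proofs are below) =====
def Claim_equal_missings : Prop := ∀ (data : List (Int × Int)), Dom_missings data → Pre_missings data → Spec_missings data (missings data)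

-- ===== LEMMAS AND PROOFS =====

-- the interior gaps of a strictly increasing list, neighbour by neighbour
def pvGaps : List Int → List Int
  | a :: b :: t => PySem.List.pyRange (a + 1) b 1 ++ pvGaps (b :: t)
  | _ => []

lemma pairwise_le_getLast (l : List Int) (h : l ≠ []) (hp : l.Pairwise (· < ·)) :
    ∀ x ∈ l, x ≤ l.getLast h := by
  induction l with
  | nil => simp at h
  | cons a t ih =>
    intro x hx
    cases t with
    | nil => simp at hx; simp [hx]
    | cons b t' =>
      rw [List.getLast_cons (by simp)]
      rcases List.mem_cons.mp hx with rfl | hx'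
      · have := List.pairwise_cons.mp hp
        exact le_of_lt (this.1 _ (List.getLast_mem _))
      · exact ih (by simp) (List.pairwise_cons.mp hp).2 x hx'

lemma pvGaps_gt (c : Int) (t : List Int) (hp : (c :: t).Pairwise (· < ·)) :
    ∀ x ∈ pvGaps (c :: t), c < x := by
  induction t generalizing c with
  | nil => intro x hx; simp [pvGaps] at hx
  | cons b t' ih =>
    intro x hx
    rw [pvGaps] at hx
    rcases List.mem_append.mp hx with hx | hx
    · have := (PySem.List.mem_pyRange_one.mp hx).1; omega
    · have hcb : c < b := (List.pairwise_cons.mp hp).1 _ (by simp)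
      have := ih b (List.pairwise_cons.mp hp).2 x hx
      omega

lemma pvGaps_pairwise (s : List Int) (hp : s.Pairwise (· < ·)) :
    (pvGaps s).Pairwise (· < ·) := by
  induction s with
  | nil => simp [pvGaps]
  | cons a t ih =>
    cases t with
    | nil => simp [pvGaps]
    | cons b t' =>
      rw [pvGaps]
      have hp' := (List.pairwise_cons.mp hp).2
      refine List.pairwise_append.mpr ⟨PySem.List.pairwise_lt_pyRange_one _ _, ih hp', ?_⟩
      intro x hx y hy
      have hxb := (PySem.List.mem_pyRange_one.mp hx).2
      have := pvGaps_gt b t' hp' y hy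
      omega

lemma fold_eq (s : List Int) : ∀ (acc : List Int), s.Pairwise (· < ·) → acc.Nodup →
    (∀ x ∈ acc, ∀ y ∈ s, x < y) →
    (s.zip s.tail).foldl
      (fun out p => PySem.Set.update out (PySem.List.pyRange (p.1 + 1) p.2 1)) acc
    = acc ++ pvGaps s := by
  induction s with
  | nil => intro acc _ _ _; simp [pvGaps]
  | cons a t ih =>
    intro acc hp hnd hlt
    cases t with
    | nil => simp [pvGaps]
    | cons b t' =>
      have hab : a < b := (List.pairwise_cons.mp hp).1 _ (by simp)
      have hr : ∀ x ∈ PySem.List.pyRange (a + 1) b 1, a + 1 ≤ x ∧ x < b := by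
        intro x hx; exact PySem.List.mem_pyRange_one.mp hx
      have hdisj : ∀ x ∈ PySem.List.pyRange (a + 1) b 1, x ∉ acc := by
        intro x hx hxa
        have h1 := (hr x hx).1
        have h2 := hlt x hxa a (by simp)
        omega
      have hstep : PySem.Set.update acc (PySem.List.pyRange (a + 1) b 1)
          = acc ++ PySem.List.pyRange (a + 1) b 1 :=
        PySem.Set.update_eq_append_of_disjoint acc _ (PySem.List.nodup_pyRange_one _ _) hdisj
      have hp' := (List.pairwise_cons.mp hp).2
      have hrec := ih (acc ++ PySem.List.pyRange (a + 1) b 1) hp'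
        (by
          refine List.Nodup.append hnd (PySem.List.nodup_pyRange_one _ _) ?_
          intro x hxa hxr; exact hdisj x hxr hxa)
        (by
          intro x hx y hy
          rcases List.mem_append.mp hx with hx | hx
          · exact hlt x hx y (by simp [hy])
          · have h2 := (hr x hx).2
            have hby : b ≤ y := by
              rcases List.mem_cons.mp hy with rfl | hy'
              · omega
              · exact le_of_lt ((List.pairwise_cons.mp hp').1 _ hy')
            omega)
      simp only [List.zip, List.tail, List.zipWith, List.foldl] at *
      rw [hstep, hrec, pvGaps, List.append_assoc]

lemma filter_eq (t : List Int) : ∀ a : Int, (a :: t).Pairwise (· < ·) →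
    (PySem.List.pyRange a ((a :: t).getLast (by simp)) 1).filter
      (fun x => decide (x ∉ (a :: t)))
    = pvGaps (a :: t) := by
  induction t with
  | nil =>
    intro a _
    simp [PySem.List.pyRange_one_eq_nil (le_refl a), pvGaps]
  | cons b t' ih =>
    intro a hp
    have hab : a < b := (List.pairwise_cons.mp hp).1 _ (by simp)
    have hp' := (List.pairwise_cons.mp hp).2
    have hL : b ≤ (b :: t').getLast (by simp) :=
      pairwise_le_getLast _ (by simp) hp' _ (by simp)
    rw [List.getLast_cons (by simp)]
    rw [PySem.List.pyRange_one_append a (a + 1) ((b :: t').getLast (by simp)) (by omega) (by omega)]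
    rw [PySem.List.pyRange_one_append (a + 1) b ((b :: t').getLast (by simp)) (by omega) hL]
    rw [PySem.List.pyRange_one_singleton]
    rw [List.filter_append, List.filter_append]
    have h1 : List.filter (fun x => decide (x ∉ (a :: b :: t'))) [a] = [] := by
      simp
    have h2 : List.filter (fun x => decide (x ∉ (a :: b :: t')))
        (PySem.List.pyRange (a + 1) b 1) = PySem.List.pyRange (a + 1) b 1 := by
      rw [List.filter_eq_self]
      intro x hx
      have hx' := PySem.List.mem_pyRange_one.mp hx
      simp only [List.mem_cons, decide_eq_true_eq]
      push Not
      refine ⟨by omega, by omega, ?_⟩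
      intro hxt
      have : b < x := (List.pairwise_cons.mp hp').1 _ hxt
      omega
    have h3 : List.filter (fun x => decide (x ∉ (a :: b :: t')))
        (PySem.List.pyRange b ((b :: t').getLast (by simp)) 1)
        = List.filter (fun x => decide (x ∉ (b :: t')))
          (PySem.List.pyRange b ((b :: t').getLast (by simp)) 1) := by
      apply List.filter_congr
      intro x hx
      have hx' := PySem.List.mem_pyRange_one.mp hx
      simp only [List.mem_cons, decide_eq_decide]
      constructor
      · intro h; push Not at h ⊢; exact ⟨h.2.1, h.2.2⟩
      · intro h; push Not at h ⊢; exact ⟨by omega, h.1, h.2⟩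
    rw [h1, h2, h3, ih b hp', pvGaps]
    simp

lemma comp_eq (vals : List Int) (hv : vals ≠ []) :
    (match PySem.List.min? (PySem.Set.ofList vals) (fun x => x),
           PySem.List.max? (PySem.Set.ofList vals) (fun x => x) with
     | some mn, some mx =>
        PySem.Set.ofList ((PySem.List.pyRange mn mx 1).filter
          (fun a => !(PySem.Set.contains (PySem.Set.ofList vals) a)))
     | _, _ => ([] : List Int))
    = gapsB vals := by
  set rows : PySem.Set Int := PySem.Set.ofList vals with hrows
  set s : List Int := PySem.List.sorted rows (fun x => x) false with hsdef
  have hsmem : ∀ x, x ∈ s ↔ x ∈ rows := by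
    intro x; rw [hsdef]; exact PySem.List.mem_sorted _ _ _ x
  have hsp : s.Pairwise (· < ·) := PySem.List.sorted_ofList_pairwise_lt vals
  have hrne : rows ≠ [] := by
    cases vals with
    | nil => exact absurd rfl hv
    | cons v vs =>
      intro h
      have : v ∈ rows := (PySem.Set.mem_ofList _ _).mpr (by simp)
      rw [h] at this; simp at this
  have hsne : s ≠ [] := by
    intro h
    exact hrne ((PySem.List.sorted_eq_nil_iff _ _ _).mp h)
  obtain ⟨a, t, hst⟩ := List.exists_cons_of_ne_nil hsne
  -- min? and max? are some (rows nonempty)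
  obtain ⟨mn, hmn⟩ : ∃ mn, PySem.List.min? rows (fun x => x) = some mn := by
    cases h : PySem.List.min? rows (fun x => x) with
    | none => exact absurd ((PySem.List.min?_eq_none_iff _ _).mp h) hrne
    | some mn => exact ⟨mn, rfl⟩
  obtain ⟨mx, hmx⟩ : ∃ mx, PySem.List.max? rows (fun x => x) = some mx := by
    cases h : PySem.List.max? rows (fun x => x) with
    | none => exact absurd ((PySem.List.max?_eq_none_iff _ _).mp h) hrne
    | some mx => exact ⟨mx, rfl⟩
  -- mn is the head of s
  have hmna : mn = a := by
    have h1 : mn ∈ rows := PySem.List.min?_mem hmn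
    have h2 : ∀ y ∈ rows, mn ≤ y := PySem.List.min?_isMin hmn
    have ha1 : a ∈ rows := (hsmem a).mp (by rw [hst]; simp)
    have ha2 : a ≤ mn := by
      have hmns : mn ∈ s := (hsmem mn).mpr h1
      rw [hst] at hmns
      rcases List.mem_cons.mp hmns with rfl | h
      · exact le_refl _
      · rw [hst] at hsp
        exact le_of_lt ((List.pairwise_cons.mp hsp).1 _ h)
    exact le_antisymm (h2 a ha1) ha2
  -- mx is the last of s
  have hmxl : mx = s.getLast hsne := by
    have h1 : mx ∈ rows := PySem.List.max?_mem hmx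
    have h2 : ∀ y ∈ rows, y ≤ mx := PySem.List.max?_isMax hmx
    have hl1 : s.getLast hsne ∈ rows := (hsmem _).mp (List.getLast_mem _)
    have hl2 : mx ≤ s.getLast hsne :=
      pairwise_le_getLast s hsne hsp mx ((hsmem mx).mpr h1)
    exact le_antisymm hl2 (h2 _ hl1)
  rw [hmn, hmx]
  have hfc : (PySem.List.pyRange mn mx 1).filter (fun x => !(PySem.Set.contains rows x))
      = (PySem.List.pyRange mn mx 1).filter (fun x => decide (x ∉ s)) := by
    apply List.filter_congr
    intro x _
    by_cases hx : x ∈ rows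
    · have h2 : x ∈ s := (hsmem x).mpr hx
      simp [h2, hx]
    · have h2 : x ∉ s := fun h => hx ((hsmem x).mp h)
      simp [h2, hx]
  have hglast : s.getLast hsne = (a :: t).getLast (by simp) := by
    congr 1
  have hfilt : (PySem.List.pyRange mn mx 1).filter (fun x => decide (x ∉ s)) = pvGaps s := by
    rw [hmna, hmxl, hglast, hst]
    exact filter_eq t a (hst ▸ hsp)
  have hnodup : (pvGaps s).Nodup :=
    (pvGaps_pairwise s hsp).imp (fun h => ne_of_lt h)
  have hB : gapsB vals = pvGaps s := by
    rw [gapsB]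
    simp only [← hrows, ← hsdef, PySem.List.slice_from_one]
    exact fold_eq s [] hsp (by simp) (by simp)
  show PySem.Set.ofList ((PySem.List.pyRange mn mx 1).filter
      (fun a => !(PySem.Set.contains rows a))) = gapsB vals
  rw [hfc, hfilt, hB]
  exact PySem.Set.ofList_eq_self_of_nodup _ hnodup

-- ===== VERDICT (by name: the statement is the Claim_ definition above) =====
theorem missings_spec : Claim_equal_missings := by
  intro data _ hpre
  unfold Spec_missings missings missings_alt
  have h1 : data.map (fun p => p.1) ≠ [] := by
    cases data with
    | nil => exact absurd rfl hpre
    | cons d ds => simp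
  have h2 : data.map (fun p => p.2) ≠ [] := by
    cases data with
    | nil => exact absurd rfl hpre
    | cons d ds => simp
  simp only []
  rw [Prod.mk.injEq]
  exact ⟨comp_eq _ h1, comp_eq _ h2⟩
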